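-- pv_equiv track=rewrite | github.com/hyelimchoi1223/Algorithm-Study | 프로그래머스/[프로그래머스]12899/solved.py | solution
-- ===== SOURCE A (Python) =====
-- def solution(n):
--     answer = ''
--     remain = []
--     while n > 0:
--         if n % 3 == 0:
--             remain.append(4)
--             n = n//3-1
--         else:
--             remain.append(n % 3)
--             n = n//3
--
--     answer = ''.join(map(str, remain[::-1]))
--     return answer
-- ===== SOURCE B (Python) =====
-- def solution(n):
--     # Rank-based conversion: first find the length L of the answer by summing
--     # block sizes 3, 9, 27, ... of the 1-, 2-, 3-digit 124-strings; then decode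
--     # the 0-based rank within the length-L block as an ordinary base-3 numeral,
--     # most-significant digit first, via the lookup string "124".
--     if n <= 0:
--         return ''
--     L, total, count = 1, 0, 3
--     while total + count < n:
--         total += count
--         count *= 3
--         L += 1
--     m = n - total - 1
--     s = []
--     p = count // 3
--     for _ in range(L):
--         s.append("124"[m // p])
--         m %= p
--         p //= 3
--     return ''.join(s)
-- ===== Notes on version B (the rewrite author's own statement) =====
-- stated objective: alternative
-- what changed: B abandons A's one-digit-per-iteration remainder loop: it first determines the answer length L by summing block sizes 3,9,27,..., then decodes the 0-based rank of n within the length-L block as an ordinary base-3 numeral most-significant-digit first via the lookup string "124".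
import Mathlib
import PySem

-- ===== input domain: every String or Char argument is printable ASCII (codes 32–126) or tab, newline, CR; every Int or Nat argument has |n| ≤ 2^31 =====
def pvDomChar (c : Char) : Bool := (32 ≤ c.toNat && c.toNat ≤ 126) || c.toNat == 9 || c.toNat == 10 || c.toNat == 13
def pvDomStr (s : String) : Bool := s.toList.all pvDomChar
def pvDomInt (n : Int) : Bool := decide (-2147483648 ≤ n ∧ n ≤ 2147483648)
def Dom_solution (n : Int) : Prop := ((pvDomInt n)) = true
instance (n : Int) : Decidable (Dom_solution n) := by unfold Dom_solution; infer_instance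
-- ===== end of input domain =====

-- B replaces A's one-digit-per-iteration remainder loop by a two-phase rank
-- decoding: find the answer length L from block sizes 3,9,27,…, then read the
-- rank within the length-L block off as base-3 digits MSB-first (objective: alternative).

-- ===== PORT A =====
-- the while loop: state is (n, remain); appends per A's branch structure
def solutionLoop (n : Int) (remain : List Int) : List Int :=
  if n > 0 then
    if PySem.Int.mod n 3 = 0 then
      solutionLoop (PySem.Int.floordiv n 3 - 1) (remain ++ [4])
    else
      solutionLoop (PySem.Int.floordiv n 3) (remain ++ [PySem.Int.mod n 3])
  else remain
termination_by n.toNat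
decreasing_by
  · rw [PySem.Int.floordiv_eq_ediv_of_pos (by norm_num : (0:Int) < 3)]; omega
  · rw [PySem.Int.floordiv_eq_ediv_of_pos (by norm_num : (0:Int) < 3)]; omega

-- ''.join(map(str, remain[::-1]))  (remain[::-1] ported as List.reverse, exact)
def solution (n : Int) : String :=
  PySem.Str.join "" ((solutionLoop n []).reverse.map PySem.Int.toStr)

-- ===== PORT B =====
-- Source B's first while loop: L, total, count = 1, 0, 3; while total+count < n: …
-- State kept as Nat (all these Python ints are nonnegative: total, count start
-- at 0, 3 and only grow; the comparison with n is made after the n <= 0 early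
-- return, so n.toNat is exact). The extra '0 < count' conjunct only totalises
-- the recursion (count is always a power of 3, so it always holds).
def findLen (nn total count L : Nat) : Nat × Nat × Nat :=
  if 0 < count ∧ total + count < nn then
    findLen nn (total + count) (count * 3) (L + 1)
  else (L, total, count)
termination_by nn - total
decreasing_by omega

-- Source B's for loop: s.append("124"[m // p]); m %= p; p //= 3  — run L times.
-- "124"[m // p] is always in range in real runs (m < 3*p); .getD '?' totalises.
def writeDigits : Nat → Nat → Nat → List Char → List Char
  | 0, _, _, s => s
  | k + 1, m, p, s =>
      writeDigits k (m % p) (p / 3)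
        (s ++ [(PySem.Str.pyGet? "124" ((m / p : Nat) : Int)).getD '?'])

-- ''.join(s)  (s is a list of single characters, held as Chars)
def solution_alt (n : Int) : String :=
  if n ≤ 0 then "" else
    match findLen n.toNat 0 3 1 with
    | (L, total, count) =>
        String.ofList (writeDigits L (n.toNat - total - 1) (count / 3) [])

-- ===== PRECONDITION & SPEC =====
def Spec_solution (n : Int) (out : String) : Prop := out = solution_alt n
instance (n : Int) (out : String) : Decidable (Spec_solution n out) := by
  unfold Spec_solution; infer_instance

-- ===== CLAIM (what is proved, stated in full; the proofs are below) =====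
def Claim_equal_solution : Prop := ∀ (n : Int), Dom_solution n → Spec_solution n (solution n)

-- ===== LEMMAS AND PROOFS =====

-- the digit character for a bijective-base-3 remainder r ∈ {0,1,2}
def d3 (r : Nat) : Char := if r = 0 then '1' else if r = 1 then '2' else '4'

theorem lookup_eq_d3 (r : Nat) (h : r < 3) :
    (PySem.Str.pyGet? "124" ((r : Nat) : Int)).getD '?' = d3 r := by
  interval_cases r <;> decide

-- the common digit-string specification, MSB first
-- base3 L m : the L low base-3 digits of m, most significant first
def base3 : Nat → Nat → List Char
  | 0, _ => []
  | L + 1, m => base3 L (m / 3) ++ [d3 (m % 3)]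

-- repc n : the 124-system string of n as a char list (bijective base 3)
def repc (n : Nat) : List Char :=
  if n = 0 then [] else repc ((n - 1) / 3) ++ [d3 ((n - 1) % 3)]
termination_by n
decreasing_by omega

theorem base3_msb (L : Nat) : ∀ m, m < 3 ^ (L + 1) →
    base3 (L + 1) m = d3 (m / 3 ^ L) :: base3 L (m % 3 ^ L) := by
  induction L with
  | zero =>
      intro m hm
      show base3 0 (m / 3) ++ [d3 (m % 3)] = _
      simp only [base3, pow_zero, Nat.div_one, List.nil_append]
      rw [Nat.mod_eq_of_lt (by simpa using hm)]
  | succ L ih =>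
      intro m hm
      show base3 (L + 1) (m / 3) ++ [d3 (m % 3)] = _
      have h3 : m / 3 < 3 ^ (L + 1) := by
        have : 3 ^ (L + 1 + 1) = 3 ^ (L + 1) * 3 := pow_succ 3 (L + 1)
        omega
      rw [ih (m / 3) h3]
      show d3 (m / 3 / 3 ^ L) :: (base3 L (m / 3 % 3 ^ L) ++ [d3 (m % 3)]) = _
      have e1 : m / 3 / 3 ^ L = m / 3 ^ (L + 1) := by
        rw [Nat.div_div_eq_div_mul, ← pow_succ']
      have e2 : m / 3 % 3 ^ L = m % 3 ^ (L + 1) / 3 := by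
        rw [pow_succ']
        exact (Nat.mod_mul_right_div_self m 3 (3 ^ L)).symm
      have e3 : m % 3 ^ (L + 1) % 3 = m % 3 := by
        apply Nat.mod_mod_of_dvd
        exact dvd_pow_self 3 (Nat.succ_ne_zero L)
      rw [e1, e2]
      show _ = d3 (m / 3 ^ (L + 1)) :: (base3 L (m % 3 ^ (L + 1) / 3) ++ [d3 (m % 3 ^ (L + 1) % 3)])
      rw [e3]

-- writeDigits produces exactly base3, appended to its accumulator
theorem wd (L : Nat) : ∀ m s, m < 3 ^ L →
    writeDigits L m (3 ^ L / 3) s = s ++ base3 L m := by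
  induction L with
  | zero => intro m s _; simp [writeDigits, base3]
  | succ L ih =>
      intro m s hm
      have hp : 3 ^ (L + 1) / 3 = 3 ^ L := by
        rw [pow_succ]; exact Nat.mul_div_cancel _ (by norm_num)
      rw [hp]
      show writeDigits L (m % 3 ^ L) (3 ^ L / 3)
            (s ++ [(PySem.Str.pyGet? "124" ((m / 3 ^ L : Nat) : Int)).getD '?']) = _
      have hd : m / 3 ^ L < 3 := by
        have : 3 ^ (L + 1) = 3 ^ L * 3 := pow_succ 3 L
        have hpos : 0 < 3 ^ L := pow_pos (by norm_num : (0:ℕ) < 3) L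
        exact Nat.div_lt_of_lt_mul (by omega)
      rw [lookup_eq_d3 _ hd, ih _ _ (Nat.mod_lt _ (pow_pos (by norm_num : (0:ℕ) < 3) L)),
          base3_msb L m hm]
      simp

-- the rank decomposition: within the block of length-(L+1) strings, the
-- bijective representation is the ordinary base-3 numeral of the 0-based rank
theorem rep_base3 (L : Nat) : ∀ t n, 2 * t + 3 = 3 ^ (L + 1) → t < n → n ≤ t + 3 ^ (L + 1) →
    repc n = base3 (L + 1) (n - t - 1) := by
  induction L with
  | zero =>
      intro t n ht h1 h2
      have ht0 : t = 0 := by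
        have h31 : (3:ℕ) ^ (0 + 1) = 3 := by norm_num
        omega
      subst ht0
      rw [(by norm_num : (3:ℕ) ^ (0 + 1) = 3)] at h2
      rw [repc]
      have hn : ¬ n = 0 := by omega
      rw [if_neg hn]
      have e1 : (n - 1) / 3 = 0 := by omega
      rw [e1, repc, if_pos rfl]
      show [d3 ((n - 1) % 3)] = base3 0 ((n - 0 - 1) / 3) ++ [d3 ((n - 0 - 1) % 3)]
      simp [base3]
  | succ L ih =>
      intro t n ht h1 h2
      have hpow : 3 ^ (L + 1 + 1) = 3 ^ (L + 1) * 3 := pow_succ 3 (L + 1)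
      have hpos : 0 < 3 ^ (L + 1) := pow_pos (by norm_num : (0:ℕ) < 3) _
      -- t = 3*t' + 3 with 2*t' + 3 = 3^(L+1)
      have ht' : 2 * ((t - 3) / 3) + 3 = 3 ^ (L + 1) ∧ t = 3 * ((t - 3) / 3) + 3 := by omega
      set t' := (t - 3) / 3 with ht'def
      obtain ⟨ht'1, ht'2⟩ := ht'
      have hb1 : t' < (n - 1) / 3 := by omega
      have hb2 : (n - 1) / 3 ≤ t' + 3 ^ (L + 1) := by omega
      have hrec := ih t' ((n - 1) / 3) ht'1 hb1 hb2
      rw [repc, if_neg (by omega : ¬ n = 0), hrec]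
      show base3 (L + 1) ((n - 1) / 3 - t' - 1) ++ [d3 ((n - 1) % 3)] = _
      have em : (n - t - 1) / 3 = (n - 1) / 3 - t' - 1 := by omega
      have er : (n - t - 1) % 3 = (n - 1) % 3 := by omega
      show _ = base3 (L + 1) ((n - t - 1) / 3) ++ [d3 ((n - t - 1) % 3)]
      rw [em, er]

-- findLen's invariant: total = (3^L - 3)/2, count = 3^L; its exit conditions
theorem findLen_spec (k : Nat) : ∀ nn total L, nn - total = k → 2 * total + 3 = 3 ^ L →
    total < nn →
    ∃ L' t', findLen nn total (3 ^ L) L = (L', t', 3 ^ L') ∧ 2 * t' + 3 = 3 ^ L' ∧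
      t' < nn ∧ nn ≤ t' + 3 ^ L' := by
  induction k using Nat.strong_induction_on with
  | _ k ihk =>
    intro nn total L hk ht htn
    have hpos : 0 < 3 ^ L := pow_pos (by norm_num : (0:ℕ) < 3) _
    rw [findLen]
    by_cases hc : total + 3 ^ L < nn
    · rw [if_pos ⟨hpos, hc⟩]
      have hsucc : 3 ^ L * 3 = 3 ^ (L + 1) := (pow_succ 3 L).symm
      rw [hsucc]
      exact ihk (nn - (total + 3 ^ L)) (by omega) nn (total + 3 ^ L) (L + 1) rfl
        (by rw [pow_succ]; omega) (by omega)
    · rw [if_neg (by tauto)]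
      exact ⟨L, total, rfl, ht, htn, by omega⟩

theorem toStr1 : PySem.Int.toStr 1 = String.ofList ['1'] := by decide
theorem toStr2 : PySem.Int.toStr 2 = String.ofList ['2'] := by decide
theorem toStr4 : PySem.Int.toStr 4 = String.ofList ['4'] := by decide

-- one appended digit on each side of the loop invariant
theorem stepL (ra : List Int) (d : Int) (c : Char) (l : List Char)
    (h : PySem.Int.toStr d = String.ofList [c]) :
    List.map PySem.Int.toStr (ra ++ [d]) ++ List.map (fun c => String.ofList [c]) l.reverse
      = List.map PySem.Int.toStr ra ++
          List.map (fun c => String.ofList [c]) ((l ++ [c]).reverse) := by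
  simp [h]

-- A's loop, digit by digit, builds (repc n).reverse after the accumulator
theorem loopA (k : Nat) : ∀ (n : Int), n.toNat = k → ∀ (ra : List Int),
    (solutionLoop n ra).map PySem.Int.toStr =
      ra.map PySem.Int.toStr ++ ((repc n.toNat).reverse.map (fun c => String.ofList [c])) := by
  induction k using Nat.strong_induction_on with
  | _ k ih =>
    intro n hk ra
    rw [solutionLoop]
    by_cases hn : n > 0
    · simp only [hn, if_true]
      rw [PySem.Int.mod_eq_emod_of_pos (by norm_num : (0:Int) < 3),
          PySem.Int.floordiv_eq_ediv_of_pos (by norm_num : (0:Int) < 3)]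
      have hrep : repc n.toNat =
          repc ((n.toNat - 1) / 3) ++ [d3 ((n.toNat - 1) % 3)] := by
        rw [repc, if_neg (by omega)]
      have h3 : n % 3 = 0 ∨ n % 3 = 1 ∨ n % 3 = 2 := by omega
      rcases h3 with h | h | h
      · rw [if_pos h]
        have hn' : (n / 3 - 1).toNat = (n.toNat - 1) / 3 := by omega
        rw [ih ((n / 3 - 1).toNat) (by omega) _ rfl, hn', hrep]
        have hd : d3 ((n.toNat - 1) % 3) = '4' := by
          have : (n.toNat - 1) % 3 = 2 := by omega
          rw [this]; rfl
        rw [hd]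
        exact stepL ra 4 '4' _ toStr4
      · rw [if_neg (by omega), h]
        have hn' : (n / 3).toNat = (n.toNat - 1) / 3 := by omega
        rw [ih ((n / 3).toNat) (by omega) _ rfl, hn', hrep]
        have hd : d3 ((n.toNat - 1) % 3) = '1' := by
          have : (n.toNat - 1) % 3 = 0 := by omega
          rw [this]; rfl
        rw [hd]
        exact stepL ra 1 '1' _ toStr1
      · rw [if_neg (by omega), h]
        have hn' : (n / 3).toNat = (n.toNat - 1) / 3 := by omega
        rw [ih ((n / 3).toNat) (by omega) _ rfl, hn', hrep]
        have hd : d3 ((n.toNat - 1) % 3) = '2' := by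
          have : (n.toNat - 1) % 3 = 1 := by omega
          rw [this]; rfl
        rw [hd]
        exact stepL ra 2 '2' _ toStr2
    · simp only [hn, if_false]
      have : n.toNat = 0 := by omega
      rw [this, repc]
      simp
-- joining one-character strings with the empty separator is String.ofList
theorem join_singletons (cs : List Char) :
    PySem.Str.join "" (cs.map (fun c => String.ofList [c])) = String.ofList cs := by
  simp only [PySem.Str.join, List.map_map]
  have h1 : (String.toList ∘ fun c => String.ofList [c]) = fun c => [c] := by
    funext c; simp
  have h0 : "".toList = ([] : List Char) := rfl
  rw [h1, h0, PySem.Chars.join_nil_singletons]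

theorem solution_eq_repc (n : Int) : solution n = String.ofList (repc n.toNat) := by
  unfold solution
  rw [List.map_reverse, loopA n.toNat n rfl []]
  simp only [List.map_nil, List.nil_append, ← List.map_reverse, List.reverse_reverse]
  exact join_singletons _

-- ===== VERDICT (by name: the statement is the Claim_ definition above) =====
theorem solution_spec : Claim_equal_solution := by
  intro n _
  unfold Spec_solution solution_alt
  rw [solution_eq_repc]
  by_cases hn : n ≤ 0
  · rw [if_pos hn]
    have : n.toNat = 0 := by omega
    rw [this, repc]
    rfl
  · rw [if_neg hn]
    obtain ⟨L', t', heq, ht', h1, h2⟩ :=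
      findLen_spec n.toNat n.toNat 0 1 rfl (by norm_num) (by omega)
    rw [(by norm_num : (3:ℕ) ^ 1 = 3)] at heq
    have hL' : 1 ≤ L' := by
      rcases L' with _ | L
      · simp only [pow_zero] at ht'; omega
      · omega
    obtain ⟨L'', rfl⟩ : ∃ L'', L' = L'' + 1 := ⟨L' - 1, by omega⟩
    rw [heq]
    have hm : n.toNat - t' - 1 < 3 ^ (L'' + 1) := by
      have : 0 < 3 ^ (L'' + 1) := pow_pos (by norm_num : (0:ℕ) < 3) _
      omega
    show String.ofList (repc n.toNat) =
      String.ofList (writeDigits (L'' + 1) (n.toNat - t' - 1) (3 ^ (L'' + 1) / 3) [])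
    rw [wd (L'' + 1) _ _ hm, rep_base3 L'' t' n.toNat ht' h1 h2]
    simp
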